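-- pv_equiv track=rewrite | github.com/FmBlueSystem/blueLibray | harmonic_mixer/analysis/contextual_curves.py | _is_compatible_activity
-- ===== SOURCE A (Python) =====
-- from typing import Dict, List, Tuple, Optional, Union
--
-- def _is_compatible_activity(track_activity: str, curve_activities: List[str]) -> bool:
--     """Check if activities are compatible"""
--     compatible_activities = {
--         'party': ['dance', 'celebration', 'social dancing'],
--         'workout': ['fitness', 'energy', 'motivation'],
--         'chill': ['relax', 'background', 'lounge'],
--         'dance': ['party', 'social dancing', 'celebration'],
--         'focus': ['work', 'study', 'background']
--     }
--
--     for curve_activity in curve_activities: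
--         if track_activity in compatible_activities.get(curve_activity.lower(), []):
--             return True
--     return False
-- ===== SOURCE B (Python) =====
-- # B: hardcoded reverse index (value -> compatible curve keys) + lowered set of
-- # curve activities; iterates over the (at most two) reverse keys instead of
-- # scanning the curve list with repeated dict lookups.
-- _REVERSE_COMPAT = {
--     'dance': ('party',),
--     'celebration': ('party', 'dance'),
--     'social dancing': ('party', 'dance'),
--     'fitness': ('workout',),
--     'energy': ('workout',),
--     'motivation': ('workout',),
--     'relax': ('chill',),
--     'background': ('chill', 'focus'),
--     'lounge': ('chill',),
--     'party': ('dance',),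
--     'work': ('focus',),
--     'study': ('focus',),
-- }
--
-- def _is_compatible_activity(track_activity, curve_activities):
--     """Check if activities are compatible"""
--     keys_for_track = _REVERSE_COMPAT.get(track_activity, ())
--     lowered = {c.lower() for c in curve_activities}
--     return any(k in lowered for k in keys_for_track)
-- ===== Notes on version B (the rewrite author's own statement) =====
-- stated objective: alternative
-- what changed: B drops the forward table and early-return scan: it hardcodes the precomputed reverse index (compatible value -> curve keys), looks up the track activity once, and tests the at-most-two reverse keys against the set of lowercased curve activities.
import Mathlib
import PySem

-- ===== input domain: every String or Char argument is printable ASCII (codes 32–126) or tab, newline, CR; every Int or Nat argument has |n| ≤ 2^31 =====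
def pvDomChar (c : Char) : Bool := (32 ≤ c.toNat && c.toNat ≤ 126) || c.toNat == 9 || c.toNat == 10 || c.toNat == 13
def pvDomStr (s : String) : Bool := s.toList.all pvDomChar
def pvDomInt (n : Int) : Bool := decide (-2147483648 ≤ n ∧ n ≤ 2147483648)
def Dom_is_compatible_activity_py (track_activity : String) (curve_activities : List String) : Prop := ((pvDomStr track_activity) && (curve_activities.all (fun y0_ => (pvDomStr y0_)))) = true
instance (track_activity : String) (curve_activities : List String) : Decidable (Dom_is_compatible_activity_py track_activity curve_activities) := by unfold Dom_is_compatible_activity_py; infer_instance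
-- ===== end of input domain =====

-- B replaces A's forward-table scan of the curve list with a hardcoded reverse index
-- (value -> keys) probed against a lowered set (objective: alternative; same cost).

-- ===== PORT A =====
-- the literal compatibility table of A
def pvTableA : PySem.Dict String (List String) :=
  PySem.Dict.ofList
    [("party", ["dance", "celebration", "social dancing"]),
     ("workout", ["fitness", "energy", "motivation"]),
     ("chill", ["relax", "background", "lounge"]),
     ("dance", ["party", "social dancing", "celebration"]),
     ("focus", ["work", "study", "background"])]

-- the for-loop with early return: first hit wins, else False
def pvLoopA (track_activity : String) : List String → Bool
  | [] => false
  | c :: rest =>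
      if (pvTableA.getD (PySem.Str.lower c) []).contains track_activity then true
      else pvLoopA track_activity rest

def is_compatible_activity_py (track_activity : String) (curve_activities : List String) : Bool :=
  pvLoopA track_activity curve_activities

-- ===== PORT B =====
-- B's hardcoded reverse index _REVERSE_COMPAT: value -> tuple of curve keys
def pvReverseCompat : PySem.Dict String (List String) :=
  PySem.Dict.ofList
    [("dance", ["party"]),
     ("celebration", ["party", "dance"]),
     ("social dancing", ["party", "dance"]),
     ("fitness", ["workout"]),
     ("energy", ["workout"]),
     ("motivation", ["workout"]),
     ("relax", ["chill"]),
     ("background", ["chill", "focus"]),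
     ("lounge", ["chill"]),
     ("party", ["dance"]),
     ("work", ["focus"]),
     ("study", ["focus"])]

def is_compatible_activity_py_alt (track_activity : String) (curve_activities : List String) : Bool :=
  let keys_for_track := pvReverseCompat.getD track_activity []
  let lowered : PySem.Set String := PySem.Set.ofList (curve_activities.map PySem.Str.lower)
  keys_for_track.any (fun k => lowered.contains k)

-- ===== PRECONDITION & SPEC =====
def Spec_is_compatible_activity_py (track_activity : String) (curve_activities : List String) (out : Bool) : Prop := out = is_compatible_activity_py_alt track_activity curve_activities
instance (track_activity : String) (curve_activities : List String) (out : Bool) : Decidable (Spec_is_compatible_activity_py track_activity curve_activities out) := by unfold Spec_is_compatible_activity_py; infer_instance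

-- ===== CLAIM (what is proved, stated in full; the proofs are below) =====
def Claim_equal_is_compatible_activity_py : Prop := ∀ (track_activity : String) (curve_activities : List String), Dom_is_compatible_activity_py track_activity curve_activities → Spec_is_compatible_activity_py track_activity curve_activities (is_compatible_activity_py track_activity curve_activities)

-- ===== LEMMAS AND PROOFS =====

-- A's table and B's reverse index evaluate to these literal dicts
theorem pvTableA_eq :
    pvTableA = PySem.Dict.mk
      [("party", ["dance", "celebration", "social dancing"]),
       ("workout", ["fitness", "energy", "motivation"]),
       ("chill", ["relax", "background", "lounge"]),
       ("dance", ["party", "social dancing", "celebration"]),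
       ("focus", ["work", "study", "background"])] := by rfl

theorem pvReverseCompat_eq :
    pvReverseCompat = PySem.Dict.mk
      [("dance", ["party"]),
       ("celebration", ["party", "dance"]),
       ("social dancing", ["party", "dance"]),
       ("fitness", ["workout"]),
       ("energy", ["workout"]),
       ("motivation", ["workout"]),
       ("relax", ["chill"]),
       ("background", ["chill", "focus"]),
       ("lounge", ["chill"]),
       ("party", ["dance"]),
       ("work", ["focus"]),
       ("study", ["focus"])] := by rfl

-- lookup in a literal dict with distinct keys is an existential over its entries
theorem pv_mem_getD_mk (l : List (String × List String)) (hn : (l.map Prod.fst).Nodup)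
    (x y : String) :
    y ∈ (PySem.Dict.mk l).getD x [] ↔ ∃ p ∈ l, p.1 = x ∧ y ∈ p.2 := by
  induction l with
  | nil => simp [PySem.Dict.getD_eq_get?_getD, PySem.Dict.get?]
  | cons a rest ih =>
    simp only [List.map_cons, List.nodup_cons] at hn
    rw [PySem.Dict.getD_eq_get?_getD, PySem.Dict.get?_mk_cons]
    by_cases h : a.1 = x
    · subst h
      simp only [beq_self_eq_true, if_pos, Option.getD_some]
      constructor
      · intro hy; exact ⟨a, List.mem_cons_self, rfl, hy⟩
      · rintro ⟨p, hp, hpx, hpy⟩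
        rcases List.mem_cons.mp hp with rfl | hp
        · exact hpy
        · exact absurd (hpx ▸ List.mem_map_of_mem (f := Prod.fst) hp) hn.1
    · rw [if_neg (by simpa using h), ← PySem.Dict.getD_eq_get?_getD, ih hn.2]
      constructor
      · rintro ⟨p, hp, hpx, hpy⟩; exact ⟨p, List.mem_cons_of_mem _ hp, hpx, hpy⟩
      · rintro ⟨p, hp, hpx, hpy⟩
        rcases List.mem_cons.mp hp with rfl | hp
        · exact absurd hpx h
        · exact ⟨p, hp, hpx, hpy⟩

-- pointwise: membership in A's forward table agrees with membership in B's reverse index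
set_option maxHeartbeats 2000000 in
theorem pv_table_rev (t k : String) :
    t ∈ pvTableA.getD k [] ↔ k ∈ pvReverseCompat.getD t [] := by
  rw [pvTableA_eq, pvReverseCompat_eq, pv_mem_getD_mk _ (by decide), pv_mem_getD_mk _ (by decide)]
  simp only [List.mem_cons, List.not_mem_nil, or_false]
  constructor
  · rintro ⟨p, hp, hpx, hpy⟩
    rcases hp with rfl|rfl|rfl|rfl|rfl <;> simp_all <;> rcases hpy with rfl|rfl|rfl <;> tauto
  · rintro ⟨p, hp, hpx, hpy⟩
    rcases hp with rfl|rfl|rfl|rfl|rfl|rfl|rfl|rfl|rfl|rfl|rfl|rfl <;> simp_all <;>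
      rcases hpy with rfl|rfl <;> tauto

-- A's early-return scan is an existential over the curve list
theorem pv_loopA_iff (t : String) (cs : List String) :
    pvLoopA t cs = true ↔
      ∃ c ∈ cs, PySem.Str.lower c ∈ pvReverseCompat.getD t [] := by
  induction cs with
  | nil => simp [pvLoopA]
  | cons c rest ih =>
    rw [pvLoopA]
    by_cases h : PySem.Str.lower c ∈ pvReverseCompat.getD t []
    · rw [if_pos (by simpa [List.contains_eq_mem] using (pv_table_rev t (PySem.Str.lower c)).mpr h)]
      simp [h]
    · rw [if_neg (by simpa [List.contains_eq_mem] using fun hm => h ((pv_table_rev t _).mp hm))]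
      simp [h, ih]

-- B's any-over-keys says the same thing
theorem pv_alt_iff (t : String) (cs : List String) :
    is_compatible_activity_py_alt t cs = true ↔
      ∃ c ∈ cs, PySem.Str.lower c ∈ pvReverseCompat.getD t [] := by
  unfold is_compatible_activity_py_alt
  simp only [List.any_eq_true, PySem.Set.contains_iff, PySem.Set.mem_ofList, List.mem_map]
  constructor
  · rintro ⟨k, hk, c, hc, rfl⟩
    exact ⟨c, hc, hk⟩
  · rintro ⟨c, hc, hmem⟩
    exact ⟨PySem.Str.lower c, hmem, c, hc, rfl⟩

-- ===== VERDICT (by name: the statement is the Claim_ definition above) =====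
theorem is_compatible_activity_py_spec : Claim_equal_is_compatible_activity_py := by
  intro t cs _
  show is_compatible_activity_py t cs = is_compatible_activity_py_alt t cs
  rw [Bool.eq_iff_iff, is_compatible_activity_py, pv_loopA_iff, pv_alt_iff]
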